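-- pv_equiv track=rewrite | github.com/Datians/Account-ManagerAS | app/services/notify.py | _group_if_needed
-- ===== SOURCE A (Python) =====
-- def _group_if_needed(items, group_by_provider: bool):
--     if not group_by_provider:
--         return {"": items}
--     grouped = {}
--     for r in items:
--         key = r["provider"] or "(sin proveedor)"
--         grouped.setdefault(key, []).append(r)
--     return grouped
-- ===== SOURCE B (Python) =====
-- def _group_if_needed(items, group_by_provider: bool):
--     if not group_by_provider:
--         return {"": items}
--     def key(r):
--         return r["provider"] or "(sin proveedor)"
--     keys = dict.fromkeys(key(r) for r in items)
--     return {k: [r for r in items if key(r) == k] for k in keys}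
-- ===== Notes on version B (the rewrite author's own statement) =====
-- stated objective: alternative
-- what changed: Replaces A's single-pass dict-of-accumulators (setdefault+append) by a two-phase computation: first collect the distinct group keys in first-occurrence order, then build each group by filtering the item list per key.
import Mathlib
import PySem

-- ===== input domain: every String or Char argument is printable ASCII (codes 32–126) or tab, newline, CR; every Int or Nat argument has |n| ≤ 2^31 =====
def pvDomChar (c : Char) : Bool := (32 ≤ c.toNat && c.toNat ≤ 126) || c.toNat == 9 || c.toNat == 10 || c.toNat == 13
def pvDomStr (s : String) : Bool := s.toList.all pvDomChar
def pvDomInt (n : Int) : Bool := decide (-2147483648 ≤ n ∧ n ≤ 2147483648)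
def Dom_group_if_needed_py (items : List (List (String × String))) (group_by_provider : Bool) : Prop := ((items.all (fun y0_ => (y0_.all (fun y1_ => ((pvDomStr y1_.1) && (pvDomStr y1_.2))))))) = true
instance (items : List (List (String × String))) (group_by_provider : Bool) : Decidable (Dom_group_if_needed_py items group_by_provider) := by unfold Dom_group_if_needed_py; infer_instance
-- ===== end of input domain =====

-- B groups in two phases (distinct keys in first-occurrence order, then one filter per key)
-- instead of A's single setdefault+append pass; equivalent, no speed claim.


-- ===== PORT A =====
-- r["provider"] or "(sin proveedor)"  (r is a dict; the .getD "" arm is unreachable under Pre_, which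
-- requires the "provider" key to be present — Python raises KeyError exactly there)
def pvKey (r : List (String × String)) : String :=
  let p := ((PySem.Dict.mk r).get? "provider").getD ""
  if p == "" then "(sin proveedor)" else p

def group_if_needed_py (items : List (List (String × String))) (group_by_provider : Bool) : List (String × List (List (String × String))) :=
  if group_by_provider = false then [("", items)]
  else
    -- grouped.setdefault(key, []).append(r)  ==  grouped[key] = grouped.get(key, []) + [r]
    (items.foldl
      (fun (d : PySem.Dict String (List (List (String × String)))) r =>
        d.modify (pvKey r) [] (· ++ [r]))
      PySem.Dict.empty).items

-- ===== PORT B =====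
def group_if_needed_py_alt (items : List (List (String × String))) (group_by_provider : Bool) : List (String × List (List (String × String))) :=
  if group_by_provider = false then [("", items)]
  else
    let keys := PySem.List.dedup (items.map pvKey)   -- dict.fromkeys(key(r) for r in items)
    keys.map (fun k => (k, items.filter (fun r => pvKey r == k)))

-- ===== PRECONDITION & SPEC =====
-- Pre_ excludes exactly the inputs where A raises KeyError: grouping requested but some item lacks "provider".
def Pre_group_if_needed_py (items : List (List (String × String))) (group_by_provider : Bool) : Prop :=
  group_by_provider = true → ∀ r ∈ items, ((PySem.Dict.mk r).get? "provider").isSome = true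
instance (items : List (List (String × String))) (group_by_provider : Bool) : Decidable (Pre_group_if_needed_py items group_by_provider) := by unfold Pre_group_if_needed_py; infer_instance

def pvWitness_group_if_needed_py : (List (List (String × String))) × Bool :=
  ([[("provider", "acme"), ("user", "u1")], [("provider", ""), ("user", "u2")], [("provider", "acme"), ("user", "u3")]], true)

def Spec_group_if_needed_py (items : List (List (String × String))) (group_by_provider : Bool) (out : List (String × List (List (String × String)))) : Prop := out = group_if_needed_py_alt items group_by_provider
instance (items : List (List (String × String))) (group_by_provider : Bool) (out : List (String × List (List (String × String)))) : Decidable (Spec_group_if_needed_py items group_by_provider out) := by unfold Spec_group_if_needed_py; infer_instance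

-- ===== CLAIM (what is proved, stated in full; the proofs are below) =====
def Claim_equal_group_if_needed_py : Prop := ∀ (items : List (List (String × String))) (group_by_provider : Bool), Dom_group_if_needed_py items group_by_provider → Pre_group_if_needed_py items group_by_provider → Spec_group_if_needed_py items group_by_provider (group_if_needed_py items group_by_provider)

-- ===== LEMMAS AND PROOFS =====

-- A's grouping dict, characterised: its items are exactly B's list.
theorem pv_items_eq (items : List (List (String × String))) :
    (items.foldl
      (fun (d : PySem.Dict String (List (List (String × String)))) r =>
        d.modify (pvKey r) [] (· ++ [r]))
      PySem.Dict.empty).items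
    = (PySem.List.dedup (items.map pvKey)).map (fun k => (k, items.filter (fun r => pvKey r == k))) := by
  set d := items.foldl
      (fun (d : PySem.Dict String (List (List (String × String)))) r =>
        d.modify (pvKey r) [] (· ++ [r]))
      PySem.Dict.empty with hd
  have hnd : d.keys.Nodup := by
    rw [hd]
    exact PySem.Dict.nodup_keys_foldl_modify_key items pvKey [] (fun _ r => (· ++ [r]))
      PySem.Dict.empty PySem.Dict.nodup_keys_empty
  have hkeys : d.keys = PySem.List.dedup (items.map pvKey) := by
    rw [hd, PySem.Dict.keys_foldl_modify_key]
    rfl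
  have hfold : d = (items.map (fun r => (pvKey r, r))).foldl
      (fun (d : PySem.Dict String (List (List (String × String)))) p =>
        d.modify p.1 [] (· ++ [p.2])) PySem.Dict.empty := by
    rw [hd, List.foldl_map]
  have hgetD : ∀ k, d.getD k [] = items.filter (fun r => pvKey r == k) := by
    intro k
    rw [hfold, PySem.Dict.getD_foldl_modify_append]
    simp [List.filter_map, Function.comp_def]
  rw [PySem.Dict.items_eq_map_keys d hnd [], hkeys]
  exact List.map_congr_left (fun k _ => by rw [hgetD k])

-- ===== VERDICT (by name: the statement is the Claim_ definition above) =====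
theorem group_if_needed_py_spec : Claim_equal_group_if_needed_py := by
  intro items g _ _
  unfold Spec_group_if_needed_py group_if_needed_py group_if_needed_py_alt
  cases g with
  | false => rfl
  | true => simpa using pv_items_eq items
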